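-- pv_equiv track=rewrite | github.com/CZboop/Challenges-and-Interview-Question-Practice | codesignal/python/Sort by Height.py | solution
-- ===== SOURCE A (Python) =====
-- def solution(a):
--     inds = [c for c,v in enumerate(a) if v==-1]
--     x = sorted(i for i in a if i != -1)
--     new = []
--     for i in range(len(a)):
--         if i in inds:
--             new.append(-1)
--         else:
--             new.append(x[0])
--             x.pop(0)
--     return new
-- ===== SOURCE B (Python) =====
-- def solution(a):
--     res = list(a)
--     values = sorted(v for v in a if v != -1)
--     positions = [i for i, v in enumerate(a) if v != -1]
--     for p, v in zip(positions, values):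
--         res[p] = v
--     return res
-- ===== Notes on version B (the rewrite author's own statement) =====
-- stated objective: faster
-- what changed: B copies the input (keeping every -1 in place) and overwrites only the non--1 positions with the sorted values via a single zip, eliminating A's per-index membership test against the -1 index list and the repeated x.pop(0), which made A quadratic.
import Mathlib
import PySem

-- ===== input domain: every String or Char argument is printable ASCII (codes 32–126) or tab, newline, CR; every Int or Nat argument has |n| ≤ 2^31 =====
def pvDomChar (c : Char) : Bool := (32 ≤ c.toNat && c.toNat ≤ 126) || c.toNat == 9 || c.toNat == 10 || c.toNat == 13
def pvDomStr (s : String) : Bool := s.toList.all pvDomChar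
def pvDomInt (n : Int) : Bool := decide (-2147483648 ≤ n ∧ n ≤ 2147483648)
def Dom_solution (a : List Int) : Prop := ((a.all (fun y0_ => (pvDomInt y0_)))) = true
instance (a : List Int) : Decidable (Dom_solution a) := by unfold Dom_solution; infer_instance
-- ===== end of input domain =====

-- B keeps every -1 in a copy of the input and overwrites only the non--1 positions with the
-- sorted values via one zip, removing A's quadratic per-index membership test and pop(0) (faster).

-- ===== PORT A =====
-- x[0] / x.pop(0) are ported as headD 0 / tail: in A the list x is never empty when they
-- run (x holds exactly one value per non--1 index), so the Python IndexError path is unreachable.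
def solution (a : List Int) : List Int :=
  let inds : List Int :=
    (PySem.List.enumerate a 0).filterMap (fun cv => if cv.2 = -1 then some cv.1 else none)
  let x : List Int := PySem.List.sorted (a.filter (fun i => i != -1)) (fun v => v) false
  let r := (PySem.List.pyRange 0 a.length 1).foldl
    (fun (st : List Int × List Int) i =>
      if i ∈ inds then (st.1, st.2 ++ [-1])
      else (st.1.tail, st.2 ++ [st.1.headD 0]))
    (x, [])
  r.2

-- ===== PORT B =====
def solution_alt (a : List Int) : List Int :=
  let values : List Int := PySem.List.sorted (a.filter (fun v => v != -1)) (fun v => v) false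
  let positions : List Int :=
    (PySem.List.enumerate a 0).filterMap (fun iv => if iv.2 ≠ -1 then some iv.1 else none)
  (positions.zip values).foldl (fun res pv => PySem.List.pySetD res pv.1 pv.2) a

-- ===== PRECONDITION & SPEC =====
def Spec_solution (a : List Int) (out : List Int) : Prop := out = solution_alt a
instance (a : List Int) (out : List Int) : Decidable (Spec_solution a out) := by unfold Spec_solution; infer_instance

-- ===== CLAIM (what is proved, stated in full; the proofs are below) =====
def Claim_equal_solution : Prop := ∀ (a : List Int), Dom_solution a → Spec_solution a (solution a)

-- ===== LEMMAS AND PROOFS =====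

-- fillA rest x : what A's loop appends while scanning rest, consuming x at non--1 slots
def fillA : List Int → List Int → List Int
  | [], _ => []
  | h :: t, x => if h = -1 then -1 :: fillA t x else x.headD 0 :: fillA t x.tail

-- fillB rest vs : what B's overwriting fold turns rest into, consuming vs at non--1 slots
def fillB : List Int → List Int → List Int
  | [], _ => []
  | h :: t, vs =>
    if h = -1 then h :: fillB t vs
    else match vs with
         | [] => h :: fillB t []
         | v :: vs' => v :: fillB t vs'

def indsOf (a : List Int) : List Int :=
  (PySem.List.enumerate a 0).filterMap (fun cv => if cv.2 = -1 then some cv.1 else none)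

def posOf (a : List Int) : List Int :=
  (PySem.List.enumerate a 0).filterMap (fun iv => if iv.2 ≠ -1 then some iv.1 else none)

lemma mem_inds_enum (a : List Int) : ∀ (s i : Int),
    (i ∈ (PySem.List.enumerate a s).filterMap
        (fun cv => if cv.2 = -1 then some cv.1 else none))
    ↔ (∃ j : Nat, i = s + j ∧ a[j]? = some (-1)) := by
  induction a with
  | nil => intro s i; simp [PySem.List.enumerate_nil]
  | cons h t ih =>
    intro s i
    rw [PySem.List.enumerate_cons]
    simp only [List.filterMap_cons]
    constructor
    · intro hm
      by_cases hh : h = -1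
      · simp only [hh] at hm
        rcases List.mem_cons.mp hm with rfl | hm
        · exact ⟨0, by simp, by simp [hh]⟩
        · rcases (ih (s+1) i).mp hm with ⟨j, hj1, hj2⟩
          exact ⟨j+1, by push_cast; omega, by simpa using hj2⟩
      · simp only [if_neg hh] at hm
        rcases (ih (s+1) i).mp hm with ⟨j, hj1, hj2⟩
        exact ⟨j+1, by push_cast; omega, by simpa using hj2⟩
    · rintro ⟨j, rfl, hj2⟩
      cases j with
      | zero =>
        simp only [List.getElem?_cons_zero, Option.some.injEq] at hj2
        simp [hj2]
      | succ j =>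
        simp only [List.getElem?_cons_succ] at hj2
        have : s + (↑(j+1) : Int) = (s+1) + j := by push_cast; omega
        rw [this]
        have hmem := (ih (s+1) ((s+1) + j)).mpr ⟨j, rfl, hj2⟩
        by_cases hh : h = -1 <;> simp [hh, hmem]

-- A's loop over range(s, s+rest.length), where membership in inds agrees with rest
lemma loopA (inds : List Int) :
    ∀ (rest : List Int) (s : Int) (x new : List Int),
    (∀ j : Nat, j < rest.length → ((s + (j : Int)) ∈ inds ↔ rest[j]? = some (-1))) →
    (PySem.List.pyRange s (s + rest.length) 1).foldl
      (fun (st : List Int × List Int) i =>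
        if i ∈ inds then (st.1, st.2 ++ [-1])
        else (st.1.tail, st.2 ++ [st.1.headD 0]))
      (x, new)
    = (x.drop ((rest.filter (fun v => v != -1)).length), new ++ fillA rest x) := by
  intro rest
  induction rest with
  | nil =>
    intro s x new _
    rw [show s + ([] : List Int).length = s by simp, PySem.List.pyRange_one_eq_nil le_rfl]
    simp [fillA]
  | cons h t ih =>
    intro s x new H
    have hlt : s < s + (h :: t).length := by simp
    rw [PySem.List.pyRange_one_cons hlt]
    have h0 : (s ∈ inds ↔ h = -1) := by
      have := H 0 (by simp)
      simpa using this
    simp only [List.foldl_cons]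
    have hshift : s + ((h :: t).length : Int) = (s + 1) + t.length := by simp [List.length_cons]; omega
    have H' : ∀ j : Nat, j < t.length → (((s+1) + (j : Int)) ∈ inds ↔ t[j]? = some (-1)) := by
      intro j hj
      have h1 := H (j+1) (by simpa using Nat.succ_lt_succ hj)
      rw [show s + ((j+1 : Nat) : Int) = (s+1) + j by push_cast; omega] at h1
      simpa using h1
    by_cases hh : h = -1
    · have hmem : s ∈ inds := h0.mpr hh
      rw [if_pos hmem, hshift, ih (s+1) x (new ++ [-1]) H']
      simp [fillA, hh]
    · have hmem : s ∉ inds := fun hc => hh (h0.mp hc)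
      rw [if_neg hmem, hshift, ih (s+1) x.tail (new ++ [x.headD 0]) H']
      have hdrop : x.tail.drop ((t.filter (fun v => v != -1)).length)
          = x.drop (((h :: t).filter (fun v => v != -1)).length) := by
        simp [hh, List.drop_tail]
      simp only [fillA, if_neg hh]
      rw [hdrop]
      simp

lemma solution_eq_fillA (a : List Int) :
    solution a = fillA a (PySem.List.sorted (a.filter (fun i => i != -1)) (fun v => v) false) := by
  show ((PySem.List.pyRange 0 a.length 1).foldl _ (_, [])).2 = _
  have H : ∀ j : Nat, j < a.length →
      (((0 : Int) + (j : Int)) ∈ indsOf a ↔ a[j]? = some (-1)) := by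
    intro j hj
    rw [indsOf, mem_inds_enum a 0 (0 + j)]
    constructor
    · rintro ⟨j', hj', hv⟩
      have : j = j' := by omega
      simpa [this] using hv
    · intro hv; exact ⟨j, rfl, hv⟩
  have := loopA (indsOf a) a 0 (PySem.List.sorted (a.filter (fun i => i != -1)) (fun v => v) false) [] H
  rw [show (0 : Int) + (a.length : Int) = (a.length : Int) by omega] at this
  unfold indsOf at this
  rw [this]
  simp

-- positions computed from start s are the positions from 0, shifted by s
lemma pos_shift (t : List Int) : ∀ (s : Int),
    (PySem.List.enumerate t s).filterMap (fun iv => if iv.2 ≠ -1 then some iv.1 else none)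
    = ((PySem.List.enumerate t 0).filterMap (fun iv => if iv.2 ≠ -1 then some iv.1 else none)).map (· + s) := by
  induction t with
  | nil => intro s; simp [PySem.List.enumerate_nil]
  | cons h t ih =>
    intro s
    rw [PySem.List.enumerate_cons, PySem.List.enumerate_cons]
    simp only [List.filterMap_cons]
    rw [ih (s+1), ih (0+1)]
    by_cases hh : h = -1
    · simp only [hh, ne_eq, not_true_eq_false, reduceIte, List.map_map]
      congr 1; funext x; simp; omega
    · simp only [ne_eq, hh, not_false_eq_true, reduceIte, List.map_cons, List.map_map]
      congr 1
      · omega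
      · congr 1; funext x; simp; omega

lemma pos_nonneg (t : List Int) : ∀ p ∈ posOf t, 0 ≤ p := by
  induction t with
  | nil => simp [posOf, PySem.List.enumerate_nil]
  | cons h t ih =>
    intro p hp
    rw [posOf, PySem.List.enumerate_cons] at hp
    simp only [List.filterMap_cons] at hp
    rw [pos_shift t (0+1)] at hp
    by_cases hh : h = -1
    · rw [if_neg (by simp [hh])] at hp
      simp only [List.mem_map] at hp
      rcases hp with ⟨q, hq, rfl⟩
      have := ih q hq; omega
    · rw [if_pos hh] at hp
      rcases List.mem_cons.mp hp with rfl | hp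
      · omega
      · simp only [List.mem_map] at hp
        rcases hp with ⟨q, hq, rfl⟩
        have := ih q hq; omega

-- setting at indices shifted by +1 leaves the head alone
lemma fold_set_shift : ∀ (l : List (Int × Int)) (c : Int) (t : List Int),
    (∀ p ∈ l, 0 ≤ p.1) →
    (l.map (fun p => (p.1 + 1, p.2))).foldl (fun res pv => PySem.List.pySetD res pv.1 pv.2) (c :: t)
    = c :: l.foldl (fun res pv => PySem.List.pySetD res pv.1 pv.2) t := by
  intro l
  induction l with
  | nil => intro c t _; simp
  | cons p l ih =>
    intro c t hpos
    simp only [List.map_cons, List.foldl_cons]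
    have hp : 0 ≤ p.1 := hpos p (List.mem_cons_self)
    have hset : PySem.List.pySetD (c :: t) (p.1 + 1) p.2 = c :: PySem.List.pySetD t p.1 p.2 := by
      rw [PySem.List.pySetD_of_nonneg (c :: t) p.2 (by omega), PySem.List.pySetD_of_nonneg t p.2 hp]
      rw [show (p.1 + 1).toNat = p.1.toNat + 1 by omega]
      simp [List.set]
    rw [hset, ih c (PySem.List.pySetD t p.1 p.2) (fun q hq => hpos q (List.mem_cons_of_mem _ hq))]

lemma foldB_eq_fillB : ∀ (a vs : List Int),
    ((posOf a).zip vs).foldl (fun res pv => PySem.List.pySetD res pv.1 pv.2) a = fillB a vs := by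
  intro a
  induction a with
  | nil => intro vs; simp [posOf, PySem.List.enumerate_nil, fillB]
  | cons h t ih =>
    intro vs
    have hpos : posOf (h :: t) =
        (if h ≠ -1 then [(0 : Int)] else []) ++ (posOf t).map (· + 1) := by
      rw [posOf, PySem.List.enumerate_cons]
      simp only [List.filterMap_cons]
      rw [pos_shift t (0+1)]
      by_cases hh : h = -1 <;> simp [hh, posOf]
    by_cases hh : h = -1
    · rw [hpos, if_neg (by simp [hh])]
      simp only [List.nil_append]
      rw [List.zip_map_left]
      have : (Prod.map (· + (1 : Int)) (id : Int → Int)) = (fun p : Int × Int => (p.1 + 1, p.2)) := by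
        funext p; cases p; rfl
      rw [this, show (((posOf t).zip vs).map (fun p : Int × Int => (p.1 + 1, p.2))) =
          ((posOf t).zip vs).map (fun p => (p.1 + 1, p.2)) from rfl]
      rw [fold_set_shift (((posOf t).zip vs)) h t
        (fun p hp => pos_nonneg t p.1 (List.of_mem_zip hp).1)]
      rw [ih vs]
      simp [fillB, hh]
    · rw [hpos, if_pos hh]
      cases vs with
      | nil =>
        simp only [List.singleton_append, List.zip_nil_right, List.foldl_nil]
        rw [show fillB (h :: t) [] = h :: fillB t [] by simp [fillB, hh]]
        have : fillB t [] = t := by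
          clear ih hpos
          induction t with
          | nil => simp [fillB]
          | cons c ct ihh =>
            by_cases hc : c = -1 <;> simp [fillB, hc, ihh]
        rw [this]
      | cons v vs' =>
        simp only [List.singleton_append, List.zip_cons_cons, List.foldl_cons]
        have hset0 : PySem.List.pySetD (h :: t) (0 : Int) v = v :: t := by
          rw [PySem.List.pySetD_of_nonneg (h :: t) v le_rfl]; rfl
        rw [hset0, List.zip_map_left]
        have hmap : (Prod.map (· + (1 : Int)) (id : Int → Int)) = (fun p : Int × Int => (p.1 + 1, p.2)) := by
          funext p; cases p; rfl
        rw [hmap, fold_set_shift (((posOf t).zip vs')) v t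
          (fun p hp => pos_nonneg t p.1 (List.of_mem_zip hp).1)]
        rw [ih vs']
        simp [fillB, hh]

lemma fillA_eq_fillB : ∀ (a vs : List Int),
    vs.length = (a.filter (fun v => v != -1)).length → fillA a vs = fillB a vs := by
  intro a
  induction a with
  | nil => intro vs _; simp [fillA, fillB]
  | cons h t ih =>
    intro vs hlen
    by_cases hh : h = -1
    · rw [show fillA (h :: t) vs = -1 :: fillA t vs by simp [fillA, hh],
          show fillB (h :: t) vs = h :: fillB t vs by simp [fillB, hh], hh]
      exact congrArg _ (ih vs (by simpa [List.filter_cons, hh] using hlen))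
    · have : (vs.length) = (t.filter (fun v => v != -1)).length + 1 := by
        simpa [List.filter_cons, hh] using hlen
      cases vs with
      | nil => simp at this
      | cons v vs' =>
        rw [show fillA (h :: t) (v :: vs') = v :: fillA t vs' by simp [fillA, hh],
            show fillB (h :: t) (v :: vs') = v :: fillB t vs' by simp [fillB, hh]]
        exact congrArg _ (ih vs' (by simpa using this))

-- ===== VERDICT (by name: the statement is the Claim_ definition above) =====
theorem solution_spec : Claim_equal_solution := by
  intro a _
  show solution a = solution_alt a
  rw [solution_eq_fillA a]
  have halt : solution_alt a =
      ((posOf a).zip (PySem.List.sorted (a.filter (fun v => v != -1)) (fun v => v) false)).foldl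
        (fun res pv => PySem.List.pySetD res pv.1 pv.2) a := rfl
  rw [halt, foldB_eq_fillB]
  exact fillA_eq_fillB a _ (by rw [PySem.List.length_sorted])
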